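-- pv_equiv track=rewrite | github.com/ArsanAbdi/iut_final | OTHERS/EXO5_advent_code.py | somme_controle2_v1
-- ===== SOURCE A (Python) =====
-- from typing import Callable, List, Any
--
-- def somme_controle2_v1(feuille_calcul: List[List[int]]) -> int:
-- 	"""
-- 	Calcule la somme des différences entre le maximum et le minimum de chaque ligne
-- 	dans une feuille de calcul.
--
-- 	Args:
-- 		feuille_calcul (list): Une liste de listes représentant une feuille de calcul.
--
-- 	Returns:
-- 		int: La somme des différences entre le maximum et le minimum de chaque ligne.
-- 	"""
-- 	somme = 0
--
-- 	for ligne in feuille_calcul :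
--
-- 		for i in range(len(ligne)) :
-- 			for j in range(len(ligne)) :
--
-- 				if ligne[i] % ligne[j] == 0 and ligne[i] != ligne[j]:
-- 					somme += ligne[i] // ligne[j]
--
-- 	return somme
-- ===== SOURCE B (Python) =====
-- from collections import Counter
--
-- def somme_controle2_v1(feuille_calcul):
--     """Same checksum, but aggregated by value: count each value once per row and
--     weight each ordered pair of distinct values by the product of their counts."""
--     somme = 0
--     for ligne in feuille_calcul:
--         compteur = Counter(ligne)
--         for a, ca in compteur.items():
--             for b, cb in compteur.items():
--                 if a % b == 0 and a != b:
--                     somme += ca * cb * (a // b)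
--     return somme
-- ===== Notes on version B (the rewrite author's own statement) =====
-- stated objective: alternative
-- what changed: B replaces the per-index double scan of each row by a Counter built in one pass and a double loop over the distinct values only, weighting each ordered pair of distinct values by the product of their counts; per row this is O(n + U^2) (U = distinct values), which helps on duplicate-heavy rows and matches A's cost otherwise.
import Mathlib
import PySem

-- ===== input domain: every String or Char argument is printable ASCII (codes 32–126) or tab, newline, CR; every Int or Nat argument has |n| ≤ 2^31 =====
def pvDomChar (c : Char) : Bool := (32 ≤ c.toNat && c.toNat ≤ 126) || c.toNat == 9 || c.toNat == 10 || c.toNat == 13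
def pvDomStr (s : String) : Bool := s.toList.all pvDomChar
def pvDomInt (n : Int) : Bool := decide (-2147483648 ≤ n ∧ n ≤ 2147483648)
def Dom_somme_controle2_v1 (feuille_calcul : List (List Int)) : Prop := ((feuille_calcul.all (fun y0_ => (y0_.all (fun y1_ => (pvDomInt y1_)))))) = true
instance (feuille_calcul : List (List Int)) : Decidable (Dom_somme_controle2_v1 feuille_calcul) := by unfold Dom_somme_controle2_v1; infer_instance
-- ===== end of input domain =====

-- B aggregates each row by a Counter and sums over ordered pairs of DISTINCT values
-- weighted by the product of their counts, instead of A's double scan over all index pairs.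

-- ===== PORT A =====
def somme_controle2_v1 (feuille_calcul : List (List Int)) : Int :=
  feuille_calcul.foldl (fun somme ligne =>
    (PySem.List.pyRange 0 (PySem.List.len ligne)).foldl (fun somme i =>
      (PySem.List.pyRange 0 (PySem.List.len ligne)).foldl (fun somme j =>
        if PySem.Int.mod (PySem.List.pyGetD ligne i 0) (PySem.List.pyGetD ligne j 0) = 0 ∧
            PySem.List.pyGetD ligne i 0 ≠ PySem.List.pyGetD ligne j 0 then
          somme + PySem.Int.floordiv (PySem.List.pyGetD ligne i 0) (PySem.List.pyGetD ligne j 0)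
        else somme) somme) somme) 0

-- ===== PORT B =====
def somme_controle2_v1_alt (feuille_calcul : List (List Int)) : Int :=
  feuille_calcul.foldl (fun somme ligne =>
    let compteur := PySem.Dict.counter ligne
    compteur.items.foldl (fun somme p =>
      compteur.items.foldl (fun somme q =>
        if PySem.Int.mod p.1 q.1 = 0 ∧ p.1 ≠ q.1 then
          somme + p.2 * q.2 * PySem.Int.floordiv p.1 q.1
        else somme) somme) somme) 0

-- ===== PRECONDITION & SPEC =====
-- Pre_ excludes exactly the inputs where Python raises ZeroDivisionError: a row containing 0.
def Pre_somme_controle2_v1 (feuille_calcul : List (List Int)) : Prop :=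
  ∀ ligne ∈ feuille_calcul, (0 : Int) ∉ ligne
instance (feuille_calcul : List (List Int)) : Decidable (Pre_somme_controle2_v1 feuille_calcul) := by unfold Pre_somme_controle2_v1; infer_instance
def pvWitness_somme_controle2_v1 : List (List Int) := [[2, 4, 4], [9, 3]]
def Spec_somme_controle2_v1 (feuille_calcul : List (List Int)) (out : Int) : Prop := out = somme_controle2_v1_alt feuille_calcul
instance (feuille_calcul : List (List Int)) (out : Int) : Decidable (Spec_somme_controle2_v1 feuille_calcul out) := by unfold Spec_somme_controle2_v1; infer_instance

-- ===== CLAIM (what is proved, stated in full; the proofs are below) =====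
def Claim_equal_somme_controle2_v1 : Prop := ∀ (feuille_calcul : List (List Int)), Dom_somme_controle2_v1 feuille_calcul → Pre_somme_controle2_v1 feuille_calcul → Spec_somme_controle2_v1 feuille_calcul (somme_controle2_v1 feuille_calcul)

-- ===== LEMMAS AND PROOFS =====

-- the common pair contribution
def pvG (a b : Int) : Int :=
  if PySem.Int.mod a b = 0 ∧ a ≠ b then PySem.Int.floordiv a b else 0

-- the common per-row value: sum of pvG over all ordered pairs of elements
def pvRowSum (ligne : List Int) : Int :=
  (ligne.map (fun x => (ligne.map (fun y => pvG x y)).sum)).sum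

lemma pv_ite_add_eq {β : Type} (c : β → Prop) [DecidablePred c] (v : β → Int) :
    (fun (s : Int) (x : β) => if c x then s + v x else s)
      = (fun s x => s + (if c x then v x else 0)) := by
  funext s x; split_ifs <;> simp

lemma pv_foldl_ite_add {β : Type} (l : List β) (c : β → Prop) [DecidablePred c]
    (v : β → Int) (s : Int) :
    l.foldl (fun s x => if c x then s + v x else s) s
      = s + (l.map (fun x => if c x then v x else 0)).sum := by
  rw [pv_ite_add_eq, PySem.List.foldl_add]

lemma pv_sum_ite_single (keys : List Int) (x : Int) (h : Int → Int)
    (hnd : keys.Nodup) (hx : x ∈ keys) :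
    (keys.map (fun a => if a = x then h a else 0)).sum = h x := by
  induction keys with
  | nil => cases hx
  | cons k ks ih =>
    by_cases hkx : k = x
    · subst hkx
      have hkks : k ∉ ks := (List.nodup_cons.mp hnd).1
      have hz : (ks.map (fun a => if a = k then h a else 0)).sum = 0 := by
        apply List.sum_eq_zero
        intro z hz
        rcases List.mem_map.mp hz with ⟨a, ha, rfl⟩
        have hak : a ≠ k := fun e => hkks (e ▸ ha)
        simp [hak]
      simp [hz]
    · have hx' : x ∈ ks := by
        rcases List.mem_cons.mp hx with e | hx'
        · exact absurd e.symm hkx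
        · exact hx'
      simp [hkx, ih (List.nodup_cons.mp hnd).2 hx']

lemma pv_sum_count (xs : List Int) (keys : List Int) (h : Int → Int)
    (hnd : keys.Nodup) (hmem : ∀ x ∈ xs, x ∈ keys) :
    (keys.map (fun a => (xs.count a : Int) * h a)).sum = (xs.map h).sum := by
  induction xs with
  | nil => simp
  | cons x xs ih =>
    have hsplit : (fun a => ((x :: xs).count a : Int) * h a)
        = (fun a => (xs.count a : Int) * h a + (if a = x then h a else 0)) := by
      funext a
      by_cases hax : a = x
      · subst hax; simp [List.count_cons_self]; ring
      · have hxa : ¬ x = a := fun e => hax e.symm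
        simp [hxa]
        exact fun e => absurd e hax
    rw [hsplit]
    have : (keys.map (fun a => (xs.count a : Int) * h a + (if a = x then h a else 0))).sum
        = (keys.map (fun a => (xs.count a : Int) * h a)).sum
          + (keys.map (fun a => if a = x then h a else 0)).sum := by
      rw [← List.sum_map_add]
    rw [this, ih (fun y hy => hmem y (List.mem_cons_of_mem _ hy)),
        pv_sum_ite_single keys x h hnd (hmem x (List.mem_cons_self)), List.map_cons,
        List.sum_cons]
    ring

lemma pv_sum_map_mul_left {β : Type} (l : List β) (a : Int) (f : β → Int) :
    (l.map (fun x => a * f x)).sum = a * (l.map f).sum := by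
  induction l with
  | nil => simp
  | cons z zs ih => simp only [List.map_cons, List.sum_cons, ih, mul_add]

-- A's inner double loop over index pairs computes s + pvRowSum ligne
lemma pv_rowA (ligne : List Int) (s : Int) :
    (PySem.List.pyRange 0 (PySem.List.len ligne)).foldl (fun somme i =>
      (PySem.List.pyRange 0 (PySem.List.len ligne)).foldl (fun somme j =>
        if PySem.Int.mod (PySem.List.pyGetD ligne i 0) (PySem.List.pyGetD ligne j 0) = 0 ∧
            PySem.List.pyGetD ligne i 0 ≠ PySem.List.pyGetD ligne j 0 then
          somme + PySem.Int.floordiv (PySem.List.pyGetD ligne i 0) (PySem.List.pyGetD ligne j 0)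
        else somme) somme) s = s + pvRowSum ligne := by
  have hinner : ∀ (a s : Int),
      (PySem.List.pyRange 0 (PySem.List.len ligne)).foldl (fun somme j =>
        if PySem.Int.mod a (PySem.List.pyGetD ligne j 0) = 0 ∧
            a ≠ PySem.List.pyGetD ligne j 0 then
          somme + PySem.Int.floordiv a (PySem.List.pyGetD ligne j 0)
        else somme) s = s + (ligne.map (fun y => pvG a y)).sum := by
    intro a s
    rw [pv_foldl_ite_add]
    have : (PySem.List.pyRange 0 (PySem.List.len ligne)).map
        (fun j => if PySem.Int.mod a (PySem.List.pyGetD ligne j 0) = 0 ∧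
            a ≠ PySem.List.pyGetD ligne j 0 then
          PySem.Int.floordiv a (PySem.List.pyGetD ligne j 0) else 0)
        = ((PySem.List.pyRange 0 (PySem.List.len ligne)).map
            (fun j => PySem.List.pyGetD ligne j 0)).map (fun y => pvG a y) := by
      rw [List.map_map]; rfl
    rw [this, PySem.List.map_pyGetD_pyRange_zero]
  have houter : (fun (somme : Int) (i : Int) =>
      (PySem.List.pyRange 0 (PySem.List.len ligne)).foldl (fun somme j =>
        if PySem.Int.mod (PySem.List.pyGetD ligne i 0) (PySem.List.pyGetD ligne j 0) = 0 ∧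
            PySem.List.pyGetD ligne i 0 ≠ PySem.List.pyGetD ligne j 0 then
          somme + PySem.Int.floordiv (PySem.List.pyGetD ligne i 0) (PySem.List.pyGetD ligne j 0)
        else somme) somme)
      = (fun somme i => somme + (ligne.map (fun y => pvG (PySem.List.pyGetD ligne i 0) y)).sum) := by
    funext somme i; exact hinner (PySem.List.pyGetD ligne i 0) somme
  rw [houter, PySem.List.foldl_add]
  have : (PySem.List.pyRange 0 (PySem.List.len ligne)).map
      (fun i => (ligne.map (fun y => pvG (PySem.List.pyGetD ligne i 0) y)).sum)
      = ((PySem.List.pyRange 0 (PySem.List.len ligne)).map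
          (fun i => PySem.List.pyGetD ligne i 0)).map (fun x => (ligne.map (fun y => pvG x y)).sum) := by
    rw [List.map_map]; rfl
  rw [this, PySem.List.map_pyGetD_pyRange_zero]; rfl

-- B's inner double loop over counter items computes s + pvRowSum ligne
lemma pv_rowB (ligne : List Int) (s : Int) :
    (PySem.Dict.counter ligne).items.foldl (fun somme p =>
      (PySem.Dict.counter ligne).items.foldl (fun somme q =>
        if PySem.Int.mod p.1 q.1 = 0 ∧ p.1 ≠ q.1 then
          somme + p.2 * q.2 * PySem.Int.floordiv p.1 q.1
        else somme) somme) s = s + pvRowSum ligne := by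
  have hnd := PySem.Set.nodup_ofList ligne
  have hmem : ∀ x ∈ ligne, x ∈ PySem.Set.ofList ligne := fun x hx =>
    (PySem.Set.mem_ofList ligne x).mpr hx
  have hinner : ∀ (p : Int × Int) (s : Int),
      (PySem.Dict.counter ligne).items.foldl (fun somme q =>
        if PySem.Int.mod p.1 q.1 = 0 ∧ p.1 ≠ q.1 then
          somme + p.2 * q.2 * PySem.Int.floordiv p.1 q.1
        else somme) s = s + p.2 * (ligne.map (fun y => pvG p.1 y)).sum := by
    intro p s
    rw [pv_foldl_ite_add, PySem.Dict.items_counter]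
    have h1 : ((PySem.Set.ofList ligne).map (fun k => (k, (List.count k ligne : Int)))).map
        (fun q => if PySem.Int.mod p.1 q.1 = 0 ∧ p.1 ≠ q.1 then
          p.2 * q.2 * PySem.Int.floordiv p.1 q.1 else 0)
        = (PySem.Set.ofList ligne).map
            (fun b => (List.count b ligne : Int) * (p.2 * pvG p.1 b)) := by
      rw [List.map_map]
      apply List.map_congr_left
      intro b _
      simp only [Function.comp]
      unfold pvG
      split_ifs <;> ring
    rw [h1, pv_sum_count ligne (PySem.Set.ofList ligne) (fun b => p.2 * pvG p.1 b) hnd hmem,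
        pv_sum_map_mul_left ligne p.2 (fun y => pvG p.1 y)]
  have houter : (fun (somme : Int) (p : Int × Int) =>
      (PySem.Dict.counter ligne).items.foldl (fun somme q =>
        if PySem.Int.mod p.1 q.1 = 0 ∧ p.1 ≠ q.1 then
          somme + p.2 * q.2 * PySem.Int.floordiv p.1 q.1
        else somme) somme)
      = (fun somme p => somme + p.2 * (ligne.map (fun y => pvG p.1 y)).sum) := by
    funext somme p; exact hinner p somme
  rw [houter, PySem.List.foldl_add, PySem.Dict.items_counter]
  have h3 : ((PySem.Set.ofList ligne).map (fun k => (k, (List.count k ligne : Int)))).map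
      (fun p => p.2 * (ligne.map (fun y => pvG p.1 y)).sum)
      = (PySem.Set.ofList ligne).map
          (fun a => (List.count a ligne : Int) * (ligne.map (fun y => pvG a y)).sum) := by
    rw [List.map_map]; rfl
  rw [h3, pv_sum_count ligne (PySem.Set.ofList ligne)
        (fun a => (ligne.map (fun y => pvG a y)).sum) hnd hmem]
  rfl

lemma pv_both_eq (feuille_calcul : List (List Int)) :
    somme_controle2_v1 feuille_calcul = somme_controle2_v1_alt feuille_calcul := by
  unfold somme_controle2_v1 somme_controle2_v1_alt
  suffices h : ∀ (s : Int),
      feuille_calcul.foldl (fun somme ligne =>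
        (PySem.List.pyRange 0 (PySem.List.len ligne)).foldl (fun somme i =>
          (PySem.List.pyRange 0 (PySem.List.len ligne)).foldl (fun somme j =>
            if PySem.Int.mod (PySem.List.pyGetD ligne i 0) (PySem.List.pyGetD ligne j 0) = 0 ∧
                PySem.List.pyGetD ligne i 0 ≠ PySem.List.pyGetD ligne j 0 then
              somme + PySem.Int.floordiv (PySem.List.pyGetD ligne i 0) (PySem.List.pyGetD ligne j 0)
            else somme) somme) somme) s
      = feuille_calcul.foldl (fun somme ligne =>
          (PySem.Dict.counter ligne).items.foldl (fun somme p =>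
            (PySem.Dict.counter ligne).items.foldl (fun somme q =>
              if PySem.Int.mod p.1 q.1 = 0 ∧ p.1 ≠ q.1 then
                somme + p.2 * q.2 * PySem.Int.floordiv p.1 q.1
              else somme) somme) somme) s by
    exact h 0
  induction feuille_calcul with
  | nil => intro s; rfl
  | cons ligne rest ih =>
    intro s
    simp only [List.foldl_cons]
    rw [pv_rowA ligne s, pv_rowB ligne s]
    exact ih (s + pvRowSum ligne)

-- ===== VERDICT (by name: the statement is the Claim_ definition above) =====
theorem somme_controle2_v1_spec : Claim_equal_somme_controle2_v1 := by
  intro feuille_calcul _ _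
  unfold Spec_somme_controle2_v1
  exact pv_both_eq feuille_calcul
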